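-- pv_equiv track=rewrite | github.com/jeakwon/jeakwon.github.io | bin/generate_cv_tex.py | render_publications
-- ===== SOURCE A (Python) =====
-- SELF_LAST_NAME = "Kwon"
--
-- def escape_latex(text: str) -> str:
--     """Escape special LaTeX characters in plain text."""
--     if not text:
--         return ""
--     text = str(text)
--     text = text.replace("\\", "\\textbackslash{}")
--     for char in "&%$#_{}":
--         text = text.replace(char, f"\\{char}")
--     text = text.replace("~", "\\textasciitilde{}")
--     text = text.replace("^", "\\textasciicircum{}")
--     return text
--
-- def format_author_latex(author_string: str) -> str:
--     """Convert BibTeX author string to LaTeX with self-bolding and marker preservation."""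
--     authors = [a.strip() for a in author_string.split(" and ")]
--     formatted = []
--     for author in authors:
--         if author.lower() == "others":
--             formatted.append("et al.")
--             continue
--
--         # Extract markers (*, †) from name parts
--         markers = ""
--         clean = author
--         for m in ["*", "\u2020"]:  # * and †
--             if m in clean:
--                 markers += m
--                 clean = clean.replace(m, "")
--
--         # Parse "Last, First" or "First Last" format
--         if "," in clean:
--             parts = clean.split(",", 1)
--             last = parts[0].strip()
--             first = parts[1].strip() if len(parts) > 1 else ""
--             display = f"{first} {last}".strip()
--         else:
--             display = clean.strip()
--
--         display = escape_latex(display)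
--         marker_tex = ""
--         if "*" in markers:
--             marker_tex += "$^*$"
--         if "\u2020" in markers:
--             marker_tex += "$^\\dagger$"
--
--         if SELF_LAST_NAME in author:
--             display = f"\\textbf{{{display}}}"
--
--         formatted.append(f"{display}{marker_tex}")
--
--     return ", ".join(formatted)
--
-- def render_publications(entries: list) -> str:
--     """Render all publications numbered, grouped by year, descending."""
--     sorted_entries = sorted(entries, key=lambda e: int(e.get("year", "0")), reverse=True)
--
--     lines = ["\\section*{Publications}", "\\begin{enumerate}"]
--     current_year = None
--
--     for entry in sorted_entries:
--         year = entry.get("year", "")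
--         if year != current_year:
--             if current_year is not None:
--                 lines.append("")
--             lines.append(f"  % --- {year} ---")
--             current_year = year
--
--         authors = format_author_latex(entry.get("author", ""))
--         title = escape_latex(entry.get("title", ""))
--         venue = entry.get("journal", "") or entry.get("booktitle", "")
--         venue = escape_latex(venue)
--
--         lines.append(f"  \\item {authors}, ``{title},'' \\textit{{{venue}}}, {year}.")
--
--     lines.append("\\end{enumerate}")
--     return "\n".join(lines)
-- ===== SOURCE B (Python) =====
-- SELF_LAST_NAME = "Kwon"
--
-- def escape_latex(text: str) -> str:
--     """Escape special LaTeX characters in plain text."""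
--     if not text:
--         return ""
--     text = str(text)
--     text = text.replace("\\", "\\textbackslash{}")
--     for char in "&%$#_{}":
--         text = text.replace(char, f"\\{char}")
--     text = text.replace("~", "\\textasciitilde{}")
--     text = text.replace("^", "\\textasciicircum{}")
--     return text
--
-- def format_author_latex(author_string: str) -> str:
--     """Convert BibTeX author string to LaTeX with self-bolding and marker preservation."""
--     authors = [a.strip() for a in author_string.split(" and ")]
--     formatted = []
--     for author in authors:
--         if author.lower() == "others":
--             formatted.append("et al.")
--             continue
--         markers = ""
--         clean = author
--         for m in ["*", "\u2020"]:
--             if m in clean: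
--                 markers += m
--                 clean = clean.replace(m, "")
--         if "," in clean:
--             parts = clean.split(",", 1)
--             last = parts[0].strip()
--             first = parts[1].strip() if len(parts) > 1 else ""
--             display = f"{first} {last}".strip()
--         else:
--             display = clean.strip()
--         display = escape_latex(display)
--         marker_tex = ""
--         if "*" in markers:
--             marker_tex += "$^*$"
--         if "\u2020" in markers:
--             marker_tex += "$^\\dagger$"
--         if SELF_LAST_NAME in author:
--             display = f"\\textbf{{{display}}}"
--         formatted.append(f"{display}{marker_tex}")
--     return ", ".join(formatted)
--
-- def _item_line(entry) -> str:
--     year = entry.get("year", "")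
--     authors = format_author_latex(entry.get("author", ""))
--     title = escape_latex(entry.get("title", ""))
--     venue = escape_latex(entry.get("journal", "") or entry.get("booktitle", ""))
--     return f"  \\item {authors}, ``{title},'' \\textit{{{venue}}}, {year}."
--
-- def render_publications(entries: list) -> str:
--     """Render all publications numbered, grouped by year, descending."""
--     sorted_entries = sorted(entries, key=lambda e: int(e.get("year", "0")), reverse=True)
--
--     # Partition the sorted list into runs of equal year STRING.
--     groups = []
--     rest = sorted_entries
--     while rest:
--         year = rest[0].get("year", "")
--         i = 1
--         while i < len(rest) and rest[i].get("year", "") == year: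
--             i += 1
--         groups.append((year, rest[:i]))
--         rest = rest[i:]
--
--     body = []
--     for idx, (year, group) in enumerate(groups):
--         if idx > 0:
--             body.append("")
--         body.append(f"  % --- {year} ---")
--         body.extend(_item_line(e) for e in group)
--
--     return "\n".join(["\\section*{Publications}", "\\begin{enumerate}"] + body + ["\\end{enumerate}"])
-- ===== Notes on version B (the rewrite author's own statement) =====
-- stated objective: alternative
-- what changed: Replaced A's single pass with a current_year sentinel by an explicit two-phase rendering: partition the sorted list into runs of equal year string, then render each group (blank line before every group but the first, header, items).
import Mathlib
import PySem

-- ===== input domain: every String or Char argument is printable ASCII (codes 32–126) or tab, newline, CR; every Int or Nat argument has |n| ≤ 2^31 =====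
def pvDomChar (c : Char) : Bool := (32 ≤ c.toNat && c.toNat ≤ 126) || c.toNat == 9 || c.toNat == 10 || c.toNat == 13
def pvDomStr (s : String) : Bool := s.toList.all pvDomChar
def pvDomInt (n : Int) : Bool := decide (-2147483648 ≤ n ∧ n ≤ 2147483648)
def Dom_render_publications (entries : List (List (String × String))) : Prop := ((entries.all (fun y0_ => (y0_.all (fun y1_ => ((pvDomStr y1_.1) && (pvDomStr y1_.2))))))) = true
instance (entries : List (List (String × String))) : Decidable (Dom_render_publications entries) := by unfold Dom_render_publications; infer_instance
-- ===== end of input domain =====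

-- B replaces A's single pass with a current_year sentinel by an explicit partition of the
-- sorted list into runs of equal year string, rendered group by group (objective: alternative).

-- ===== PORT A =====
-- shared module-level helpers of Source A (identical in Source B)

-- entry.get(k, d): first-match lookup in the association list
def pvGet (e : List (String × String)) (k d : String) : String :=
  PySem.Dict.getD (PySem.Dict.mk e) k d

def escape_latex (text : String) : String :=
  if text = "" then ""
  else
    let t := PySem.Str.replace text "\\" "\\textbackslash{}"
    let t := "&%$#_{}".toList.foldl
      (fun t c => PySem.Str.replace t (String.ofList [c]) ("\\" ++ String.ofList [c])) t
    let t := PySem.Str.replace t "~" "\\textasciitilde{}"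
    PySem.Str.replace t "^" "\\textasciicircum{}"

def format_author_latex (author_string : String) : String :=
  let authors := ((PySem.Str.split? author_string " and ").getD []).map PySem.Str.strip
  let formatted := authors.foldl (fun acc author =>
    if PySem.Str.lower author = "others" then acc ++ ["et al."]
    else
      let mc := ["*", "\u2020"].foldl
        (fun (mc : String × String) m =>
          if PySem.Str.isIn m mc.2 then (mc.1 ++ m, PySem.Str.replace mc.2 m "") else mc)
        ("", author)
      let markers := mc.1
      let clean := mc.2
      let display :=
        if PySem.Str.isIn "," clean then
          let parts := (PySem.Str.splitMax? clean "," 1).getD []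
          let last := PySem.Str.strip (parts.getD 0 "")
          let first := if parts.length > 1 then PySem.Str.strip (parts.getD 1 "") else ""
          PySem.Str.strip (first ++ " " ++ last)
        else PySem.Str.strip clean
      let display := escape_latex display
      let marker_tex :=
        (if PySem.Str.isIn "*" markers then "$^*$" else "") ++
        (if PySem.Str.isIn "\u2020" markers then "$^\\dagger$" else "")
      let display :=
        if PySem.Str.isIn "Kwon" author then "\\textbf{" ++ display ++ "}" else display
      acc ++ [display ++ marker_tex]) []
  PySem.Str.join ", " formatted

-- sort key: int(e.get("year", "0")); total via getD 0, exact under Pre_ (A raises ValueError otherwise)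
def pvYearKey (e : List (String × String)) : Int :=
  (PySem.Int.ofStr? (pvGet e "year" "0")).getD 0

def render_publications (entries : List (List (String × String))) : String :=
  let sorted_entries := PySem.List.sorted entries pvYearKey true
  let st := sorted_entries.foldl
    (fun (st : List String × Option String) entry =>
      let year := pvGet entry "year" ""
      let st :=
        if some year ≠ st.2 then
          ((if st.2 = none then st.1 else st.1 ++ [""]) ++ ["  % --- " ++ year ++ " ---"],
           some year)
        else st
      let authors := format_author_latex (pvGet entry "author" "")
      let title := escape_latex (pvGet entry "title" "")
      let venue := let j := pvGet entry "journal" ""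
                   if j ≠ "" then j else pvGet entry "booktitle" ""
      let venue := escape_latex venue
      (st.1 ++ ["  \\item " ++ authors ++ ", ``" ++ title ++ ",'' \\textit{" ++ venue
                ++ "}, " ++ year ++ "."], st.2))
    (["\\section*{Publications}", "\\begin{enumerate}"], none)
  PySem.Str.join "\n" (st.1 ++ ["\\end{enumerate}"])

-- ===== PORT B =====
-- _item_line of Source B
def pvItemLine (entry : List (String × String)) : String :=
  let year := pvGet entry "year" ""
  let authors := format_author_latex (pvGet entry "author" "")
  let title := escape_latex (pvGet entry "title" "")
  let venue := escape_latex (let j := pvGet entry "journal" ""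
                             if j ≠ "" then j else pvGet entry "booktitle" "")
  "  \\item " ++ authors ++ ", ``" ++ title ++ ",'' \\textit{" ++ venue ++ "}, " ++ year ++ "."

-- the while-loop of Source B: split off the maximal run of entries sharing the head's year string
def pvGroups : List (List (String × String)) → List (String × List (List (String × String)))
  | [] => []
  | e :: rest =>
    let year := pvGet e "year" ""
    (year, e :: rest.takeWhile (fun e' => pvGet e' "year" "" == year)) ::
      pvGroups (rest.dropWhile (fun e' => pvGet e' "year" "" == year))
termination_by l => l.length
decreasing_by simpa using Nat.lt_succ_of_le (List.length_dropWhile_le _ _)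

def pvGroupBlock (g : String × List (List (String × String))) : List String :=
  ("  % --- " ++ g.1 ++ " ---") :: g.2.map pvItemLine

def render_publications_alt (entries : List (List (String × String))) : String :=
  let sorted_entries := PySem.List.sorted entries pvYearKey true
  let groups := pvGroups sorted_entries
  let body :=
    match groups with
    | [] => []
    | g :: gs => pvGroupBlock g ++ gs.flatMap (fun g' => "" :: pvGroupBlock g')
  PySem.Str.join "\n"
    (["\\section*{Publications}", "\\begin{enumerate}"] ++ body ++ ["\\end{enumerate}"])

-- ===== PRECONDITION & SPEC =====
-- Pre_: every entry's year string parses as a Python int; on any other input A (and B) raise ValueError.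
def Pre_render_publications (entries : List (List (String × String))) : Prop :=
  ∀ e ∈ entries, (PySem.Int.ofStr? (pvGet e "year" "0")).isSome = true
instance (entries : List (List (String × String))) : Decidable (Pre_render_publications entries) := by
  unfold Pre_render_publications; infer_instance

def pvWitness_render_publications : (List (List (String × String))) :=
  [[("year", "2021"), ("author", "Kwon, J")], [("year", "2020"), ("title", "T")]]

def Spec_render_publications (entries : List (List (String × String))) (out : String) : Prop :=
  out = render_publications_alt entries
instance (entries : List (List (String × String))) (out : String) :
    Decidable (Spec_render_publications entries out) := by
  unfold Spec_render_publications; infer_instance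

-- ===== CLAIM (what is proved, stated in full; the proofs are below) =====
def Claim_equal_render_publications : Prop :=
  ∀ (entries : List (List (String × String))), Dom_render_publications entries →
    Pre_render_publications entries →
    Spec_render_publications entries (render_publications entries)

-- ===== LEMMAS AND PROOFS =====

-- abbreviations for the proof
def pvStep (st : List String × Option String) (entry : List (String × String)) :
    List String × Option String :=
  let year := pvGet entry "year" ""
  let st :=
    if some year ≠ st.2 then
      ((if st.2 = none then st.1 else st.1 ++ [""]) ++ ["  % --- " ++ year ++ " ---"], some year)
    else st
  (st.1 ++ [pvItemLine entry], st.2)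

lemma pvStep_eq_fold (l : List (List (String × String))) (st : List String × Option String) :
    l.foldl
      (fun (st : List String × Option String) entry =>
        let year := pvGet entry "year" ""
        let st :=
          if some year ≠ st.2 then
            ((if st.2 = none then st.1 else st.1 ++ [""]) ++ ["  % --- " ++ year ++ " ---"],
             some year)
          else st
        let authors := format_author_latex (pvGet entry "author" "")
        let title := escape_latex (pvGet entry "title" "")
        let venue := let j := pvGet entry "journal" ""
                     if j ≠ "" then j else pvGet entry "booktitle" ""
        let venue := escape_latex venue
        (st.1 ++ ["  \\item " ++ authors ++ ", ``" ++ title ++ ",'' \\textit{" ++ venue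
                  ++ "}, " ++ year ++ "."], st.2)) st
    = l.foldl pvStep st := by
  apply PySem.List.foldl_congr_mem
  intro acc x _
  rfl

-- consuming a run of entries that all share the current year appends only item lines
lemma pvFold_run (g : List (List (String × String))) (es : List (List (String × String)))
    (lines : List String) (y : String) (hg : ∀ e ∈ g, pvGet e "year" "" = y) :
    (g ++ es).foldl pvStep (lines, some y) = es.foldl pvStep (lines ++ g.map pvItemLine, some y) := by
  induction g generalizing lines with
  | nil => simp
  | cons e t ih =>
    have he : pvGet e "year" "" = y := hg e (by simp)
    have ht : ∀ e' ∈ t, pvGet e' "year" "" = y := fun e' h => hg e' (by simp [h])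
    simp only [List.cons_append, List.foldl_cons]
    rw [show pvStep (lines, some y) e = (lines ++ [pvItemLine e], some y) by
      simp [pvStep, he]]
    rw [ih _ ht]
    simp

def pvFlat (gs : List (String × List (List (String × String)))) : List String :=
  gs.flatMap (fun g => "" :: pvGroupBlock g)

def pvBody (gs : List (String × List (List (String × String)))) : List String :=
  match gs with
  | [] => []
  | g :: gs => pvGroupBlock g ++ pvFlat gs

lemma pvGroups_nil_iff (l : List (List (String × String))) : pvGroups l = [] ↔ l = [] := by
  cases l with
  | nil => simp [pvGroups]
  | cons e rest => simp [pvGroups]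

lemma pvFlat_eq (l : List (List (String × String))) :
    pvFlat (pvGroups l) = (if l = [] then [] else [""]) ++ pvBody (pvGroups l) := by
  cases hl : l with
  | nil => simp [pvGroups, pvFlat, pvBody]
  | cons e rest =>
    have : pvGroups (e :: rest) ≠ [] := by
      rw [Ne, pvGroups_nil_iff]; simp
    cases hg : pvGroups (e :: rest) with
    | nil => exact absurd hg this
    | cons g gs => simp [pvFlat, pvBody]

lemma pv_head_dropWhile {α} (p : α → Bool) (l : List α) (x : α)
    (h : (l.dropWhile p).head? = some x) : p x = false := by
  induction l with
  | nil => simp at h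
  | cons a t ih =>
    by_cases hp : p a
    · simp [hp] at h; exact ih h
    · simp [hp] at h
      rw [← h]; simpa using hp

-- the main invariant: A's loop from a state whose current year differs from the head's year
-- produces exactly B's grouped body (with a leading blank line iff a group was already emitted)
lemma pvMain : ∀ (n : Nat) (l : List (List (String × String))) (lines : List String)
    (cur : Option String), l.length ≤ n →
    (∀ e, l.head? = some e → cur ≠ some (pvGet e "year" "")) →
    (l.foldl pvStep (lines, cur)).1
      = lines ++ (if cur = none then [] else if l = [] then [] else [""]) ++ pvBody (pvGroups l) := by
  intro n
  induction n with
  | zero =>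
    intro l lines cur hn _
    have : l = [] := List.length_eq_zero_iff.mp (Nat.le_zero.mp hn)
    subst this
    cases cur <;> simp [pvBody, pvGroups]
  | succ n ih =>
    intro l lines cur hn hcur
    cases l with
    | nil => cases cur <;> simp [pvBody, pvGroups]
    | cons e rest =>
      set y := pvGet e "year" "" with hy
      have hne : some y ≠ cur := fun h => hcur e rfl h.symm
      have hstep : pvStep (lines, cur) e
          = (lines ++ (if cur = none then [] else [""]) ++ ["  % --- " ++ y ++ " ---", pvItemLine e],
             some y) := by
        simp only [pvStep, ← hy]
        rw [if_pos hne]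
        cases cur <;> simp
      set p : List (String × String) → Bool := fun e' => pvGet e' "year" "" == y with hp
      have hsplit : rest = rest.takeWhile p ++ rest.dropWhile p :=
        (List.takeWhile_append_dropWhile).symm
      have htw : ∀ e' ∈ rest.takeWhile p, pvGet e' "year" "" = y := by
        intro e' h
        have := List.mem_takeWhile_imp h
        simpa [hp] using this
      simp only [List.foldl_cons, hstep]
      conv_lhs => rw [hsplit]
      rw [pvFold_run _ _ _ _ htw]
      have hdw : ∀ e', (rest.dropWhile p).head? = some e' → some y ≠ some (pvGet e' "year" "") := by
        intro e' h hcontra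
        have := pv_head_dropWhile p rest e' h
        simp [hp] at this
        exact this (Option.some.inj hcontra).symm
      have hlen : (rest.dropWhile p).length ≤ n := by
        have := List.length_dropWhile_le p rest
        simp at hn; omega
      rw [ih _ _ _ hlen hdw]
      have hgroups : pvGroups (e :: rest) = (y, e :: rest.takeWhile p) :: pvGroups (rest.dropWhile p) := by
        conv_lhs => rw [pvGroups]
      rw [hgroups]
      rw [show pvBody ((y, e :: rest.takeWhile p) :: pvGroups (rest.dropWhile p))
            = pvGroupBlock (y, e :: rest.takeWhile p) ++ pvFlat (pvGroups (rest.dropWhile p)) from rfl]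
      rw [pvFlat_eq]
      simp [pvGroupBlock]

-- ===== VERDICT (by name: the statement is the Claim_ definition above) =====
theorem render_publications_spec : Claim_equal_render_publications := by
  intro entries _ _
  unfold Spec_render_publications render_publications render_publications_alt
  simp only
  rw [pvStep_eq_fold]
  rw [pvMain (PySem.List.sorted entries pvYearKey true).length _ _ none le_rfl
        (by intro e _ h; simp at h)]
  cases pvGroups (PySem.List.sorted entries pvYearKey true) <;> simp [pvBody, pvFlat]
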